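-- pv_equiv track=rewrite | github.com/Jgorzitza/hotrodan-assist | vendor_data_mapping.py | _normalize_order_status
-- ===== SOURCE A (Python) =====
-- def _normalize_order_status(status: str) -> str:
--     """Normalize order status across systems"""
--     if not status:
--         return 'pending'
--
--     status_lower = status.lower()
--
--     # Map various order statuses to standard ones
--     status_mapping = {
--         'pending': ['pending', 'new', 'received', 'processing'],
--         'confirmed': ['confirmed', 'accepted', 'approved'],
--         'shipped': ['shipped', 'dispatched', 'in_transit'],
--         'delivered': ['delivered', 'completed', 'fulfilled'],
--         'cancelled': ['cancelled', 'canceled', 'void'],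
--         'returned': ['returned', 'refunded']
--     }
--
--     for standard_status, variants in status_mapping.items():
--         if status_lower in variants:
--             return standard_status
--
--     return 'unknown'
-- ===== SOURCE B (Python) =====
-- def _normalize_order_status(status: str) -> str:
--     """Normalize order status across systems"""
--     if not status:
--         return 'pending'
--     s = status.lower()
--     c = s[0]
--     if c == 'a':
--         if s == 'accepted' or s == 'approved':
--             return 'confirmed'
--     elif c == 'c':
--         if s == 'confirmed':
--             return 'confirmed'
--         if s == 'cancelled' or s == 'canceled':
--             return 'cancelled'
--         if s == 'completed':
--             return 'delivered'
--     elif c == 'd':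
--         if s == 'delivered':
--             return 'delivered'
--         if s == 'dispatched':
--             return 'shipped'
--     elif c == 'f':
--         if s == 'fulfilled':
--             return 'delivered'
--     elif c == 'i':
--         if s == 'in_transit':
--             return 'shipped'
--     elif c == 'n':
--         if s == 'new':
--             return 'pending'
--     elif c == 'p':
--         if s == 'pending' or s == 'processing':
--             return 'pending'
--     elif c == 'r':
--         if s == 'received':
--             return 'pending'
--         if s == 'returned' or s == 'refunded':
--             return 'returned'
--     elif c == 's':
--         if s == 'shipped':
--             return 'shipped'
--     elif c == 'v':
--         if s == 'void':
--             return 'cancelled'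
--     return 'unknown'
-- ===== Notes on version B (the rewrite author's own statement) =====
-- stated objective: alternative
-- what changed: Replaced the table scan over (category, variant-list) pairs by a table-free hand-written decision tree: dispatch on the first character of the lowered status, then compare against the few full variant spellings in that branch.
import Mathlib
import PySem

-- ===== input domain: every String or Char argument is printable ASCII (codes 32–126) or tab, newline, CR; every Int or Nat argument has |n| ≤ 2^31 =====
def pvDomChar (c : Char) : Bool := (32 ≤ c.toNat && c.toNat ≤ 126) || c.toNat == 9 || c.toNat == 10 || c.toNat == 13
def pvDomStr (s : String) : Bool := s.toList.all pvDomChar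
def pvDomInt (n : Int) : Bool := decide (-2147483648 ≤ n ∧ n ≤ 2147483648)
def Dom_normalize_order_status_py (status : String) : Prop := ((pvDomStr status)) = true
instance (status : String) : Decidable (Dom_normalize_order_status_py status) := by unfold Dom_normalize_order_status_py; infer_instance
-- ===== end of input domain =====

-- B replaces A's scan over (category, variant-list) pairs by a table-free decision tree
-- dispatching on the first character of the lowered status (alternative decomposition).

-- ===== PORT A =====
def pvStatusMapping : List (String × List String) :=
  [("pending", ["pending", "new", "received", "processing"]),
   ("confirmed", ["confirmed", "accepted", "approved"]),
   ("shipped", ["shipped", "dispatched", "in_transit"]),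
   ("delivered", ["delivered", "completed", "fulfilled"]),
   ("cancelled", ["cancelled", "canceled", "void"]),
   ("returned", ["returned", "refunded"])]

-- the for-loop over status_mapping.items() with the membership test and early return
def pvLoopA (sl : String) : List (String × List String) → String
  | [] => "unknown"
  | (std, variants) :: rest => if sl ∈ variants then std else pvLoopA sl rest

def normalize_order_status_py (status : String) : String :=
  if status = "" then "pending"
  else pvLoopA (PySem.Str.lower status) pvStatusMapping

-- ===== PORT B =====
-- Source B's if/elif decision tree; c = s[0] (s is nonempty at the call site, headD is exact there)
def pvDispatchB (s : String) : String :=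
  let c := s.toList.headD ' '
  if c = 'a' then
    if s = "accepted" ∨ s = "approved" then "confirmed" else "unknown"
  else if c = 'c' then
    if s = "confirmed" then "confirmed"
    else if s = "cancelled" ∨ s = "canceled" then "cancelled"
    else if s = "completed" then "delivered"
    else "unknown"
  else if c = 'd' then
    if s = "delivered" then "delivered"
    else if s = "dispatched" then "shipped"
    else "unknown"
  else if c = 'f' then
    if s = "fulfilled" then "delivered" else "unknown"
  else if c = 'i' then
    if s = "in_transit" then "shipped" else "unknown"
  else if c = 'n' then
    if s = "new" then "pending" else "unknown"
  else if c = 'p' then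
    if s = "pending" ∨ s = "processing" then "pending" else "unknown"
  else if c = 'r' then
    if s = "received" then "pending"
    else if s = "returned" ∨ s = "refunded" then "returned"
    else "unknown"
  else if c = 's' then
    if s = "shipped" then "shipped" else "unknown"
  else if c = 'v' then
    if s = "void" then "cancelled" else "unknown"
  else "unknown"

def normalize_order_status_py_alt (status : String) : String :=
  if status = "" then "pending"
  else pvDispatchB (PySem.Str.lower status)

-- ===== PRECONDITION & SPEC =====
def Spec_normalize_order_status_py (status : String) (out : String) : Prop := out = normalize_order_status_py_alt status
instance (status : String) (out : String) : Decidable (Spec_normalize_order_status_py status out) := by unfold Spec_normalize_order_status_py; infer_instance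

-- ===== CLAIM (what is proved, stated in full; the proofs are below) =====
def Claim_equal_normalize_order_status_py : Prop := ∀ (status : String), Dom_normalize_order_status_py status → Spec_normalize_order_status_py status (normalize_order_status_py status)

-- ===== LEMMAS AND PROOFS =====

set_option maxHeartbeats 1000000 in

-- the scanning loop agrees with the decision tree on every string
theorem pvLoop_eq_dispatch (sl : String) :
    pvLoopA sl pvStatusMapping = pvDispatchB sl := by
  by_cases h0 : sl = "pending"
  · subst h0; decide
  by_cases h1 : sl = "new"
  · subst h1; decide
  by_cases h2 : sl = "received"
  · subst h2; decide
  by_cases h3 : sl = "processing"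
  · subst h3; decide
  by_cases h4 : sl = "confirmed"
  · subst h4; decide
  by_cases h5 : sl = "accepted"
  · subst h5; decide
  by_cases h6 : sl = "approved"
  · subst h6; decide
  by_cases h7 : sl = "shipped"
  · subst h7; decide
  by_cases h8 : sl = "dispatched"
  · subst h8; decide
  by_cases h9 : sl = "in_transit"
  · subst h9; decide
  by_cases h10 : sl = "delivered"
  · subst h10; decide
  by_cases h11 : sl = "completed"
  · subst h11; decide
  by_cases h12 : sl = "fulfilled"
  · subst h12; decide
  by_cases h13 : sl = "cancelled"
  · subst h13; decide
  by_cases h14 : sl = "canceled"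
  · subst h14; decide
  by_cases h15 : sl = "void"
  · subst h15; decide
  by_cases h16 : sl = "returned"
  · subst h16; decide
  by_cases h17 : sl = "refunded"
  · subst h17; decide
  simp only [pvStatusMapping, pvLoopA, pvDispatchB, List.mem_cons, List.not_mem_nil,
    h0, h1, h2, h3, h4, h5, h6, h7, h8, h9, h10, h11, h12, h13, h14, h15, h16, h17,
    or_false, false_or, if_false, ite_false]
  split_ifs <;> rfl

-- ===== VERDICT (by name: the statement is the Claim_ definition above) =====
theorem normalize_order_status_py_spec : Claim_equal_normalize_order_status_py := by
  intro status _
  unfold Spec_normalize_order_status_py normalize_order_status_py normalize_order_status_py_alt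
  split_ifs with h
  · rfl
  · exact pvLoop_eq_dispatch _
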